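-- pv_equiv track=rewrite | github.com/Kh0iHuynh/Perfume_prediction_project | create_augmented_perfume_data.py | capitalize_note
-- ===== SOURCE A (Python) =====
-- def capitalize_note(note_str):
--     try:
--         return ','.join([
--             '_'.join([word.capitalize() for word in note.split('_')])
--             for note in note_str.split(',')
--         ])
--     except:
--         return note_str  # In case of non-string values (e.g., NaN)
-- ===== SOURCE B (Python) =====
-- def capitalize_note(note_str):
--     # Single left-to-right pass with a "start of token" flag instead of
--     # nested split/capitalize/join; same try/except for non-string input.
--     try:
--         out = []
--         start = True
--         for ch in note_str:
--             if ch in ',_':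
--                 out.append(ch)
--                 start = True
--             elif start:
--                 out.append(ch.upper())
--                 start = False
--             else:
--                 out.append(ch.lower())
--         return ''.join(out)
--     except:
--         return note_str
-- ===== Notes on version B (the rewrite author's own statement) =====
-- stated objective: alternative
-- what changed: Replaces the nested split(',')/split('_')/capitalize/join comprehension with a single left-to-right state-machine pass that upper-cases the character after each delimiter (or at the start) and lower-cases the rest.
import Mathlib
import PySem

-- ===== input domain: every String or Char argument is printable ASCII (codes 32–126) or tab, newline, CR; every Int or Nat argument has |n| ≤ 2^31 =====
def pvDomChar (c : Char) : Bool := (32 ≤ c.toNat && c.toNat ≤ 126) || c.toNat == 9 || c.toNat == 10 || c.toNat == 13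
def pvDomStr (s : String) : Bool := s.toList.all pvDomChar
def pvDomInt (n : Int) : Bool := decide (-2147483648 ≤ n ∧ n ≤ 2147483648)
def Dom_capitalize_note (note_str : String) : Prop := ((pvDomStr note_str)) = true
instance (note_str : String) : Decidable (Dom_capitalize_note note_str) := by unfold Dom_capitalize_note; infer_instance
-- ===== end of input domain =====

-- B replaces A's nested split/capitalize/join with one state-machine pass over the characters (objective: alternative).

-- ===== PORT A =====
-- str.capitalize(): first character upper-cased, the rest lower-cased (exact on the ASCII domain,
-- where Python's title-case of the first character coincides with upper-case).
def pyCapitalize (word : List Char) : List Char :=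
  match word with
  | [] => []
  | c :: t => PySem.Chars.upperChar c :: PySem.Chars.lower t

-- ','.join(['_'.join([word.capitalize() for word in note.split('_')]) for note in note_str.split(',')])
-- The try/except of A is unreachable for a genuine str argument, so the port is the try-body.
def capitalize_note (note_str : String) : String :=
  String.ofList (PySem.Chars.join [','] ((PySem.Chars.splitOn note_str.toList [',']).map
    (fun note => PySem.Chars.join ['_'] ((PySem.Chars.splitOn note ['_']).map pyCapitalize))))

-- ===== PORT B =====
-- the loop of Source B: `start` flag, append ch / ch.upper() / ch.lower()
def altGo (cs : List Char) (start : Bool) : List Char :=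
  match cs with
  | [] => []
  | c :: t =>
    if c = ',' || c = '_' then c :: altGo t true
    else if start then PySem.Chars.upperChar c :: altGo t false
    else PySem.Chars.lowerChar c :: altGo t false

-- The try/except of Source B is unreachable for a genuine str argument, so the port is the try-body.
def capitalize_note_alt (note_str : String) : String :=
  String.ofList (altGo note_str.toList true)

-- ===== PRECONDITION & SPEC =====
def Spec_capitalize_note (note_str : String) (out : String) : Prop := out = capitalize_note_alt note_str
instance (note_str : String) (out : String) : Decidable (Spec_capitalize_note note_str out) := by unfold Spec_capitalize_note; infer_instance

-- ===== CLAIM (what is proved, stated in full; the proofs are below) =====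
def Claim_equal_capitalize_note : Prop := ∀ (note_str : String), Dom_capitalize_note note_str → Spec_capitalize_note note_str (capitalize_note note_str)

-- ===== LEMMAS AND PROOFS =====

-- proof-side recursion equivalent to PySem.Chars.splitOn with a one-character separator
def msplit (d : Char) : List Char → List (List Char)
  | [] => [[]]
  | c :: r => if c = d then [] :: msplit d r else (msplit d r).modifyHead (c :: ·)

lemma go_spec (d : Char) : ∀ (fuel : Nat) (l cur : List Char) (acc : List (List Char)),
    l.length < fuel →
    PySem.Chars.splitOn.go [d] fuel l cur acc =
      acc.reverse ++ (msplit d l).modifyHead (cur.reverse ++ ·) := by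
  intro fuel
  induction fuel with
  | zero => intro l cur acc h; omega
  | succ n ih =>
    intro l cur acc h
    cases l with
    | nil => simp [PySem.Chars.splitOn.go, msplit, List.modifyHead]
    | cons c rest =>
      by_cases hc : c = d
      · subst hc
        have h1 : List.isPrefixOf [c] (c :: rest) = true := by
          simp [List.isPrefixOf]
        rw [PySem.Chars.splitOn.go]
        simp only [h1, if_true, List.length_cons, List.length_nil, Nat.zero_add,
          List.drop_succ_cons, List.drop_zero]
        rw [ih rest [] (cur.reverse :: acc) (by simp at h ⊢; omega)]
        simp only [msplit, List.modifyHead, List.reverse_cons, List.reverse_nil,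
          List.nil_append, List.append_assoc]
        cases hm : msplit c rest <;> simp
      · have h1 : List.isPrefixOf [d] (c :: rest) = false := by
          simp [List.isPrefixOf]
          exact fun hh => hc hh.symm
        rw [PySem.Chars.splitOn.go]
        simp only [h1, Bool.false_eq_true, if_false]
        rw [ih rest (c :: cur) acc (by simp at h ⊢; omega)]
        have h2 : (msplit d rest).modifyHead ((c :: cur).reverse ++ ·) =
            (msplit d (c :: rest)).modifyHead (cur.reverse ++ ·) := by
          simp only [msplit, if_neg hc]
          cases msplit d rest <;> simp [List.modifyHead]
        rw [h2]

lemma splitOn_eq_msplit (d : Char) (l : List Char) :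
    PySem.Chars.splitOn l [d] = msplit d l := by
  rw [PySem.Chars.splitOn, go_spec d (l.length + 1) l [] [] (by omega)]
  cases msplit d l <;> simp [List.modifyHead]

lemma msplit_ne_nil (d : Char) (l : List Char) : msplit d l ≠ [] := by
  induction l with
  | nil => simp [msplit]
  | cons c r ih =>
    by_cases hc : c = d
    · simp [msplit, hc]
    · simp only [msplit, if_neg hc]
      cases hm : msplit d r
      · exact absurd hm ih
      · simp [List.modifyHead]

lemma msplit_pure (d : Char) (t : List Char) (h : ∀ c ∈ t, c ≠ d) : msplit d t = [t] := by
  induction t with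
  | nil => simp [msplit]
  | cons c r ih =>
    have hc : c ≠ d := h c (by simp)
    rw [msplit, if_neg hc, ih (fun x hx => h x (by simp [hx]))]
    simp [List.modifyHead]

lemma msplit_append (d : Char) (u v : List Char) (h : ∀ c ∈ u, c ≠ d) :
    msplit d (u ++ v) = (msplit d v).modifyHead (u ++ ·) := by
  induction u with
  | nil =>
    simp only [List.nil_append]
    cases msplit d v <;> simp [List.modifyHead]
  | cons c r ih =>
    have hc : c ≠ d := h c (by simp)
    simp only [List.cons_append, msplit, if_neg hc,
      ih (fun x hx => h x (by simp [hx]))]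
    cases msplit d v <;> simp [List.modifyHead]

lemma msplit_delim (d : Char) (t r : List Char) (h : ∀ c ∈ t, c ≠ d) :
    msplit d (t ++ d :: r) = t :: msplit d r := by
  rw [msplit_append d t _ h]
  simp [msplit, List.modifyHead]

-- join over a separator, head piece split off an append
lemma join_cons_append (sep a b : List Char) (l : List (List Char)) :
    PySem.Chars.join sep ((a ++ b) :: l) = a ++ PySem.Chars.join sep (b :: l) := by
  cases l with
  | nil => simp [PySem.Chars.join_singleton]
  | cons x xs => simp [PySem.Chars.join_cons_cons]

-- the A-side after rewriting splitOn to msplit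
def innerA (note : List Char) : List Char :=
  PySem.Chars.join ['_'] ((msplit '_' note).map pyCapitalize)

def capA (cs : List Char) : List Char :=
  PySem.Chars.join [','] ((msplit ',' cs).map innerA)

lemma capitalize_note_eq_capA (s : String) :
    capitalize_note s = String.ofList (capA s.toList) := by
  unfold capitalize_note capA innerA
  rw [splitOn_eq_msplit]
  congr 2
  apply List.map_congr_left
  intro note _
  rw [splitOn_eq_msplit]

-- B-side helper facts
lemma altGo_delim (d : Char) (r : List Char) (b : Bool) (hd : d = ',' ∨ d = '_') :
    altGo (d :: r) b = d :: altGo r true := by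
  rcases hd with h | h <;> subst h <;> simp [altGo]

lemma altGo_false_pure (t : List Char) (h : ∀ c ∈ t, c ≠ ',' ∧ c ≠ '_') :
    ∀ r, altGo (t ++ r) false = PySem.Chars.lower t ++ altGo r false := by
  induction t with
  | nil => intro r; simp [PySem.Chars.lower]
  | cons c u ih =>
    intro r
    obtain ⟨h1, h2⟩ := h c (by simp)
    simp only [List.cons_append, altGo, h1, h2, decide_false, Bool.or_self,
      Bool.false_eq_true, if_false]
    rw [ih (fun x hx => h x (by simp [hx])) r]
    simp [PySem.Chars.lower]

lemma altGo_true_pure (t : List Char) (h : ∀ c ∈ t, c ≠ ',' ∧ c ≠ '_') (r : List Char) :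
    altGo (t ++ r) true = pyCapitalize t ++ altGo r (if t.isEmpty then true else false) := by
  cases t with
  | nil => simp [pyCapitalize]
  | cons c u =>
    obtain ⟨h1, h2⟩ := h c (by simp)
    simp only [List.cons_append, altGo, h1, h2, decide_false, Bool.or_self,
      Bool.false_eq_true, if_false, if_true]
    rw [altGo_false_pure u (fun x hx => h x (by simp [hx])) r]
    simp [pyCapitalize]

lemma innerA_pure (t : List Char) (h : ∀ c ∈ t, c ≠ '_') : innerA t = pyCapitalize t := by
  unfold innerA
  rw [msplit_pure _ _ h]
  simp [PySem.Chars.join_singleton]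

-- main induction: A's nested-split result equals B's one-pass result
lemma capA_eq_altGo : ∀ (n : Nat) (cs : List Char), cs.length ≤ n → capA cs = altGo cs true := by
  intro n
  induction n with
  | zero =>
    intro cs h
    have : cs = [] := by cases cs <;> simp_all
    subst this
    simp [capA, msplit, innerA, pyCapitalize, PySem.Chars.join_singleton, altGo]
  | succ n ih =>
    intro cs hlen
    set P : Char → Bool := fun c => !(c = ',' || c = '_') with hP
    have hsplit : cs = cs.takeWhile P ++ cs.dropWhile P := (List.takeWhile_append_dropWhile).symm
    set t := cs.takeWhile P with ht
    have htpure : ∀ c ∈ t, c ≠ ',' ∧ c ≠ '_' := by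
      intro c hc
      have := List.mem_takeWhile_imp hc
      simp [hP] at this
      exact this
    have htpure' : ∀ c ∈ t, c ≠ ',' := fun c hc => (htpure c hc).1
    have htpure'' : ∀ c ∈ t, c ≠ '_' := fun c hc => (htpure c hc).2
    cases hrest : cs.dropWhile P with
    | nil =>
      -- cs is a single delimiter-free token
      have hcs : cs = t := by rw [hsplit, hrest]; simp
      rw [hcs]
      unfold capA
      rw [msplit_pure _ _ htpure']
      simp only [List.map_cons, List.map_nil, PySem.Chars.join_singleton]
      rw [innerA_pure _ htpure'']
      rw [show altGo t true = altGo (t ++ []) true by simp]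
      rw [altGo_true_pure t htpure []]
      cases t <;> simp [altGo]
    | cons d r =>
      have hdne : cs.dropWhile P ≠ [] := by rw [hrest]; simp
      have hd : d = ',' ∨ d = '_' := by
        have h0 := List.head_dropWhile_not P hdne
        have hhd : (cs.dropWhile P).head hdne = d := by
          have h1 := congrArg List.head? hrest
          rw [List.head?_eq_some_head hdne] at h1
          exact Option.some.inj h1
        rw [hhd, hP] at h0
        rcases Decidable.em (d = ',') with h | h
        · exact Or.inl h
        · right
          by_contra h'
          simp [h, h'] at h0
      have hlenr : r.length ≤ n := by
        have h1 : cs.length = t.length + (d :: r).length := by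
          conv_lhs => rw [hsplit, hrest]
          simp
        simp at h1; omega
      have hIH := ih r hlenr
      have hcs : cs = t ++ d :: r := by rw [hsplit, hrest]
      rw [hcs]
      -- B side: peel the pure token and the delimiter
      rw [altGo_true_pure t htpure (d :: r), altGo_delim d r _ hd, ← hIH]
      -- A side
      obtain ⟨h0, tl, hm⟩ : ∃ h0 tl, msplit ',' r = h0 :: tl := by
        cases hm : msplit ',' r with
        | nil => exact absurd hm (msplit_ne_nil _ _)
        | cons x xs => exact ⟨x, xs, rfl⟩
      rcases hd with hd | hd
      · -- delimiter is ','
        subst hd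
        unfold capA
        rw [msplit_delim _ _ _ htpure', List.map_cons, innerA_pure _ htpure'',
          hm, List.map_cons, PySem.Chars.join_cons_cons]
        simp
      · -- delimiter is '_'
        subst hd
        have hupure : ∀ c ∈ t ++ ['_'], c ≠ ',' := by
          intro c hc
          rcases List.mem_append.mp hc with h | h
          · exact htpure' c h
          · simp at h; subst h; decide
        unfold capA
        have hsA : msplit ',' (t ++ '_' :: r) = (t ++ '_' :: h0) :: tl := by
          have : t ++ '_' :: r = (t ++ ['_']) ++ r := by simp
          rw [this, msplit_append ',' (t ++ ['_']) r hupure, hm]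
          simp [List.modifyHead]
        rw [hsA, List.map_cons]
        have hinner : innerA (t ++ '_' :: h0) = pyCapitalize t ++ '_' :: innerA h0 := by
          unfold innerA
          rw [msplit_delim _ _ _ htpure'', List.map_cons]
          obtain ⟨g0, gtl, hg⟩ : ∃ g0 gtl, msplit '_' h0 = g0 :: gtl := by
            cases hg : msplit '_' h0 with
            | nil => exact absurd hg (msplit_ne_nil _ _)
            | cons x xs => exact ⟨x, xs, rfl⟩
          rw [hg, List.map_cons, PySem.Chars.join_cons_cons]
          simp
        rw [hinner]
        have : pyCapitalize t ++ '_' :: innerA h0 = (pyCapitalize t ++ ['_']) ++ innerA h0 := by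
          simp
        rw [this, join_cons_append, hm, List.map_cons]
        simp

-- ===== VERDICT (by name: the statement is the Claim_ definition above) =====
theorem capitalize_note_spec : Claim_equal_capitalize_note := by
  intro s _
  unfold Spec_capitalize_note capitalize_note_alt
  rw [capitalize_note_eq_capA]
  rw [capA_eq_altGo s.toList.length s.toList (le_refl _)]
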